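-- pv_equiv track=rewrite | github.com/agrianwahab/sistem_forensik_gambar | app/core_forensic_scripts/metadata2.py | _zigzag_to_matrix
-- ===== SOURCE A (Python) =====
-- def _zigzag_to_matrix(values):
--     """Convert zigzag-ordered values to 8x8 matrix"""
--     zigzag_order = [
--         0,  1,  8, 16,  9,  2,  3, 10,
--        17, 24, 32, 25, 18, 11,  4,  5,
--        12, 19, 26, 33, 40, 48, 41, 34,
--        27, 20, 13,  6,  7, 14, 21, 28,
--        35, 42, 49, 56, 57, 50, 43, 36,
--        29, 22, 15, 23, 30, 37, 44, 51,
--        58, 59, 52, 45, 38, 31, 39, 46,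
--        53, 60, 61, 54, 47, 55, 62, 63
--     ]
--
--     matrix = [[0]*8 for _ in range(8)]
--     for i, val in enumerate(values[:64]):
--         pos = zigzag_order[i]
--         row, col = pos // 8, pos % 8
--         matrix[row][col] = val
--
--     return matrix
-- ===== SOURCE B (Python) =====
-- def _zigzag_to_matrix(values):
--     """Convert zigzag-ordered values to 8x8 matrix"""
--     coords = []
--     for d in range(15):
--         lo, hi = max(0, d - 7), min(d, 7)
--         rows = range(hi, lo - 1, -1) if d % 2 == 0 else range(lo, hi + 1)
--         coords.extend((r, d - r) for r in rows)
--     matrix = [[0] * 8 for _ in range(8)]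
--     for (r, c), val in zip(coords, values):
--         matrix[r][c] = val
--     return matrix
-- ===== Notes on version B (the rewrite author's own statement) =====
-- stated objective: alternative
-- what changed: Replaces the hardcoded 64-entry zigzag lookup table with a generator that walks the 15 anti-diagonals (upward on even diagonals, downward on odd) to produce the zigzag coordinates, then assigns the values to those coordinates in order.
import Mathlib
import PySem

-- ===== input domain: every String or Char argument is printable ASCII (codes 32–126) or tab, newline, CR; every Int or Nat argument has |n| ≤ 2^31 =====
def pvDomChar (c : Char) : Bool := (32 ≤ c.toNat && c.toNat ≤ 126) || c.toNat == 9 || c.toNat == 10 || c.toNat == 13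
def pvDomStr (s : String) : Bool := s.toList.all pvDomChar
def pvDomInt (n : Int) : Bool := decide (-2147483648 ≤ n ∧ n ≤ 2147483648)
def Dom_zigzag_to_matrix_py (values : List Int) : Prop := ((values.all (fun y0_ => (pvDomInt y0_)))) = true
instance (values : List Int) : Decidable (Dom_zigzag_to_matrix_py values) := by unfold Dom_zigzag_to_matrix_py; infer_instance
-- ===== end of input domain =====

-- B replaces A's hardcoded 64-entry zigzag lookup table by generating the zigzag
-- coordinates anti-diagonal by anti-diagonal (objective: alternative decomposition, same cost).


-- ===== PORT A =====
-- matrix[r][c] = v: exact for the non-negative in-range indices both programs produce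
def pvSetMat (m : List (List Int)) (r c : Int) (v : Int) : List (List Int) :=
  m.set r.toNat ((m.getD r.toNat []).set c.toNat v)

def pvZigzagOrder : List Int :=
  [ 0,  1,  8, 16,  9,  2,  3, 10,
   17, 24, 32, 25, 18, 11,  4,  5,
   12, 19, 26, 33, 40, 48, 41, 34,
   27, 20, 13,  6,  7, 14, 21, 28,
   35, 42, 49, 56, 57, 50, 43, 36,
   29, 22, 15, 23, 30, 37, 44, 51,
   58, 59, 52, 45, 38, 31, 39, 46,
   53, 60, 61, 54, 47, 55, 62, 63]

def zigzag_to_matrix_py (values : List Int) : List (List Int) :=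
  let matrix := List.replicate 8 (List.replicate 8 (0 : Int))
  (PySem.List.enumerate (PySem.List.slice values none (some 64))).foldl
    (fun m iv =>
      let pos := PySem.List.pyGetD pvZigzagOrder iv.1 0   -- always in range: i < 64
      let row := PySem.Int.floordiv pos 8
      let col := PySem.Int.mod pos 8
      pvSetMat m row col iv.2) matrix

-- ===== PORT B =====
def pvZzCoords : List (Int × Int) :=
  (PySem.List.pyRange 0 15 1).foldl (fun acc d =>
    let lo := max 0 (d - 7)
    let hi := min d 7
    let rows := if PySem.Int.mod d 2 = 0 then PySem.List.pyRange hi (lo - 1) (-1)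
                else PySem.List.pyRange lo (hi + 1) 1
    acc ++ rows.map (fun r => (r, d - r))) []

def zigzag_to_matrix_py_alt (values : List Int) : List (List Int) :=
  let matrix := List.replicate 8 (List.replicate 8 (0 : Int))
  (pvZzCoords.zip values).foldl (fun m p => pvSetMat m p.1.1 p.1.2 p.2) matrix

-- ===== PRECONDITION & SPEC =====
def Spec_zigzag_to_matrix_py (values : List Int) (out : List (List Int)) : Prop := out = zigzag_to_matrix_py_alt values
instance (values : List Int) (out : List (List Int)) : Decidable (Spec_zigzag_to_matrix_py values out) := by unfold Spec_zigzag_to_matrix_py; infer_instance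

-- ===== CLAIM (what is proved, stated in full; the proofs are below) =====
def Claim_equal_zigzag_to_matrix_py : Prop := ∀ (values : List Int), Dom_zigzag_to_matrix_py values → Spec_zigzag_to_matrix_py values (zigzag_to_matrix_py values)

-- ===== LEMMAS AND PROOFS =====

-- the diagonal walk generates exactly the (row, col) pairs of A's table
lemma pvCoords_eq :
    pvZzCoords = pvZigzagOrder.map (fun p => (PySem.Int.floordiv p 8, PySem.Int.mod p 8)) := by
  decide

lemma pvFold_enum_eq_zip (f : List (List Int) → Int → Int → List (List Int)) :
    ∀ (vs pre zs : List Int) (m : List (List Int)), vs.length ≤ zs.length →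
      (PySem.List.enumerate vs (pre.length : Int)).foldl
        (fun m iv => f m (PySem.List.pyGetD (pre ++ zs) iv.1 0) iv.2) m
      = (zs.zip vs).foldl (fun m p => f m p.1 p.2) m := by
  intro vs
  induction vs with
  | nil => intro pre zs m _; simp [PySem.List.enumerate_nil]
  | cons v vs ih =>
    intro pre zs m h
    cases zs with
    | nil => simp at h
    | cons z zs' =>
      rw [PySem.List.enumerate_cons]
      simp only [List.foldl_cons, List.zip_cons_cons]
      have hz : PySem.List.pyGetD (pre ++ z :: zs') ((pre.length : Int)) 0 = z := by
        rw [PySem.List.pyGetD_natCast]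
        simp [List.getD]
      rw [hz]
      have hlen : (pre.length : Int) + 1 = ((pre ++ [z]).length : Int) := by
        simp
      have happ : pre ++ z :: zs' = (pre ++ [z]) ++ zs' := by simp
      rw [hlen, happ]
      exact ih (pre ++ [z]) zs' (f m z v) (by simp at h ⊢; omega)

lemma pvZip_take {α β : Type} : ∀ (xs : List α) (ys : List β),
    xs.zip (ys.take xs.length) = xs.zip ys := by
  intro xs
  induction xs with
  | nil => intro ys; simp
  | cons x xs ih =>
    intro ys
    cases ys with
    | nil => simp
    | cons y ys => simp [List.zip_cons_cons, ih]

-- ===== VERDICT (by name: the statement is the Claim_ definition above) =====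
theorem zigzag_to_matrix_py_spec : Claim_equal_zigzag_to_matrix_py := by
  intro values _
  unfold Spec_zigzag_to_matrix_py zigzag_to_matrix_py zigzag_to_matrix_py_alt
  rw [PySem.List.slice_to values (by norm_num : (0:Int) ≤ 64)]
  have h1 := pvFold_enum_eq_zip (fun m pos v => pvSetMat m (PySem.Int.floordiv pos 8) (PySem.Int.mod pos 8) v)
      (values.take (64:Int).toNat) [] pvZigzagOrder
      (List.replicate 8 (List.replicate 8 (0 : Int)))
      (by simp [pvZigzagOrder])
  simp only [List.nil_append, List.length_nil, Int.natCast_zero] at h1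
  rw [h1]
  rw [pvCoords_eq, List.zip_map_left, List.foldl_map]
  have h64 : pvZigzagOrder.length = (64:Int).toNat := by decide
  rw [← h64, pvZip_take pvZigzagOrder values]
  simp [Prod.map]
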